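-- pv_equiv track=rewrite | github.com/RatJuggler/advent-of-code | 2015/day24/advent24.py | determine_quantum_entanglements
-- ===== SOURCE A (Python) =====
-- from typing import List, Tuple
--
-- def calculate_quantum_entanglement(packages: Tuple[int]) -> int:
--     quantum_entanglement = 1
--     for package in packages:
--         quantum_entanglement *= package
--     return quantum_entanglement
--
-- def determine_quantum_entanglements(sleigh_loadings: List[List[Tuple[int]]]) -> List[int]:
--     quantum_entanglements = []
--     min_group_size = min([len(loadings[0]) for loadings in sleigh_loadings])
--     for loading in sleigh_loadings:
--         if len(loading[0]) == min_group_size: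
--             for load in loading:
--                 quantum_entanglements.append(calculate_quantum_entanglement(load))
--     return quantum_entanglements
-- ===== SOURCE B (Python) =====
-- def determine_quantum_entanglements(sleigh_loadings):
--     # Single pass: track the running minimum group size; reset the result
--     # list whenever a strictly smaller size appears, extend on a match.
--     best_size = None
--     quantum_entanglements = []
--     for loading in sleigh_loadings:
--         size = len(loading[0])
--         if best_size is None or size < best_size:
--             best_size = size
--             quantum_entanglements = []
--         if size == best_size:
--             for load in loading:
--                 product = 1
--                 for package in load:
--                     product *= package
--                 quantum_entanglements.append(product)
--     return quantum_entanglements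
-- ===== Notes on version B (the rewrite author's own statement) =====
-- stated objective: alternative
-- what changed: Replaced A's two-phase algorithm (first scan computing min(len(loading[0])), then a second filter-and-multiply scan) with a single pass that tracks the running minimum group size, resetting the accumulated product list when a strictly smaller size appears and extending it on a match.
import Mathlib
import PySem

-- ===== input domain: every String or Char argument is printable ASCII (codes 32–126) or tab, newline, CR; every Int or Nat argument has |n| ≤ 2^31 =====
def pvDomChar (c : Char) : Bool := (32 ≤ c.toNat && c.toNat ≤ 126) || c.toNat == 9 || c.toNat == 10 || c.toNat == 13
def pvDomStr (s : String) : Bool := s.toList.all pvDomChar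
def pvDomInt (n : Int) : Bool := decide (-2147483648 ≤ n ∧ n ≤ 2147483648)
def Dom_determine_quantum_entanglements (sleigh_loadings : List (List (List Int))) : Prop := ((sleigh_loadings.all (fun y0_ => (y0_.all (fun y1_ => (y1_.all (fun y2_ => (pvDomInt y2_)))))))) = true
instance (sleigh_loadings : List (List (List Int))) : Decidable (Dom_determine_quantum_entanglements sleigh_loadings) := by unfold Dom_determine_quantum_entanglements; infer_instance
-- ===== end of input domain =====

-- B replaces A's two-phase "min-scan then filter-scan" with one pass that tracks the running
-- minimum group size, resetting the accumulator on a strictly smaller size (objective: alternative).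


-- ===== PORT A =====
def calculate_quantum_entanglement (packages : List Int) : Int :=
  packages.foldl (fun quantum_entanglement package => quantum_entanglement * package) 1

-- loading[0] is ported as (pyGet? loading 0).getD []; Pre_ excludes the empty-loading inputs
-- on which Python raises IndexError, and the empty outer list on which min(...) raises ValueError.
def determine_quantum_entanglements (sleigh_loadings : List (List (List Int))) : List Int :=
  let min_group_size : Int :=
    (PySem.List.min? (sleigh_loadings.map
        (fun loadings => (Int.ofNat ((PySem.List.pyGet? loadings 0).getD []).length)))
      (fun x => x)).getD 0
  sleigh_loadings.foldl (fun quantum_entanglements loading =>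
    if (Int.ofNat ((PySem.List.pyGet? loading 0).getD []).length) = min_group_size then
      loading.foldl (fun qe load => qe ++ [calculate_quantum_entanglement load]) quantum_entanglements
    else quantum_entanglements) []

-- ===== PORT B =====
-- state = (best_size, quantum_entanglements); one pass over sleigh_loadings
def determine_quantum_entanglements_alt (sleigh_loadings : List (List (List Int))) : List Int :=
  (sleigh_loadings.foldl (fun (st : Option Int × List Int) loading =>
      let size : Int := Int.ofNat ((PySem.List.pyGet? loading 0).getD []).length
      let st1 := match st.1 with
        | none => (some size, ([] : List Int))
        | some b => if size < b then (some size, ([] : List Int)) else st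
      if st1.1 = some size then
        (st1.1, loading.foldl (fun qe load =>
            qe ++ [load.foldl (fun product package => product * package) 1]) st1.2)
      else st1)
    (none, [])).2

-- ===== PRECONDITION & SPEC =====
-- Pre_ excludes exactly the inputs where Python A raises: the empty outer list (ValueError from
-- min) and any input containing an empty loading list (IndexError from loading[0]).
def Pre_determine_quantum_entanglements (sleigh_loadings : List (List (List Int))) : Prop :=
  sleigh_loadings ≠ [] ∧ ∀ loading ∈ sleigh_loadings, loading ≠ []
instance (sleigh_loadings : List (List (List Int))) : Decidable (Pre_determine_quantum_entanglements sleigh_loadings) := by unfold Pre_determine_quantum_entanglements; infer_instance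

def pvWitness_determine_quantum_entanglements : List (List (List Int)) := [[[2, 3], [4]], [[5]]]

def Spec_determine_quantum_entanglements (sleigh_loadings : List (List (List Int))) (out : List Int) : Prop := out = determine_quantum_entanglements_alt sleigh_loadings
instance (sleigh_loadings : List (List (List Int))) (out : List Int) : Decidable (Spec_determine_quantum_entanglements sleigh_loadings out) := by unfold Spec_determine_quantum_entanglements; infer_instance

-- ===== CLAIM (what is proved, stated in full; the proofs are below) =====
def Claim_equal_determine_quantum_entanglements : Prop := ∀ (sleigh_loadings : List (List (List Int))), Dom_determine_quantum_entanglements sleigh_loadings → Pre_determine_quantum_entanglements sleigh_loadings → Spec_determine_quantum_entanglements sleigh_loadings (determine_quantum_entanglements sleigh_loadings)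

-- ===== LEMMAS AND PROOFS =====

-- key of a loading and its list of products
def pvKey (loading : List (List Int)) : Int :=
  Int.ofNat ((PySem.List.pyGet? loading 0).getD []).length
def pvProds (loading : List (List Int)) : List Int :=
  loading.map (fun load => load.foldl (fun product package => product * package) 1)

-- A's filter pass, generalized over the accumulator
def pvF (m : Int) (sl : List (List (List Int))) (acc : List Int) : List Int :=
  sl.foldl (fun qe loading => if pvKey loading = m then qe ++ pvProds loading else qe) acc

-- B's loop body, named
def pvStep (st : Option Int × List Int) (loading : List (List Int)) : Option Int × List Int :=
  let size := pvKey loading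
  let st1 := match st.1 with
    | none => (some size, ([] : List Int))
    | some b => if size < b then (some size, ([] : List Int)) else st
  if st1.1 = some size then
    (st1.1, loading.foldl (fun qe load =>
        qe ++ [load.foldl (fun product package => product * package) 1]) st1.2)
  else st1

theorem inner_foldl_eq (loading : List (List Int)) (acc : List Int) :
    loading.foldl (fun qe load =>
        qe ++ [load.foldl (fun product package => product * package) 1]) acc
      = acc ++ pvProds loading := by
  induction loading generalizing acc with
  | nil => simp [pvProds]
  | cons x t ih =>
    simp only [List.foldl_cons, pvProds, List.map_cons]
    rw [ih]
    simp [pvProds]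

theorem pv_flatten_map (l : List (List Int)) :
    (l.map (fun x => [x.foldl (fun product package => product * package) 1])).flatten = pvProds l := by
  induction l <;> simp_all [pvProds]

theorem pvStep_some (b : Int) (acc : List Int) (l : List (List Int)) :
    pvStep (some b, acc) l =
      if pvKey l < b then (some (pvKey l), pvProds l)
      else if pvKey l = b then (some b, acc ++ pvProds l) else (some b, acc) := by
  by_cases h1 : pvKey l < b
  · simp only [pvStep, if_pos h1]
    simp [pv_flatten_map]
  · by_cases h2 : pvKey l = b
    · simp only [pvStep, if_neg h1]
      simp [h2, pv_flatten_map]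
    · simp only [pvStep, if_neg h1]
      have hne : ¬ (some b = some (pvKey l)) := by
        simp
        omega
      simp [hne, h2]

theorem pvStep_none (l : List (List Int)) :
    pvStep (none, ([] : List Int)) l = (some (pvKey l), pvProds l) := by
  simp only [pvStep]
  simp [pv_flatten_map]

theorem pvF_cons (m : Int) (l : List (List Int)) (t : List (List (List Int))) (acc : List Int) :
    pvF m (l :: t) acc = pvF m t (if pvKey l = m then acc ++ pvProds l else acc) := by
  simp only [pvF, List.foldl_cons]

theorem pvF_acc (m : Int) (sl : List (List (List Int))) (acc : List Int) :
    pvF m sl acc = acc ++ pvF m sl [] := by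
  induction sl generalizing acc with
  | nil => simp [pvF]
  | cons l t ih =>
    rw [pvF_cons, pvF_cons]
    split_ifs with h
    · rw [ih (acc ++ pvProds l), ih (([] : List Int) ++ pvProds l)]; simp
    · exact ih acc

theorem foldl_min_le_init (b : Int) (t : List (List (List Int))) :
    t.foldl (fun x u => min x (pvKey u)) b ≤ b := by
  induction t generalizing b with
  | nil => simp
  | cons u v ihv => exact le_trans (ihv _) (min_le_left _ _)

-- main invariant for B's loop started in the 'some' state
theorem pvStep_invariant (sl : List (List (List Int))) (b : Int) (acc : List Int) :
    sl.foldl pvStep (some b, acc)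
      = (some (sl.foldl (fun x u => min x (pvKey u)) b),
         if sl.foldl (fun x u => min x (pvKey u)) b = b then acc ++ pvF b sl []
         else pvF (sl.foldl (fun x u => min x (pvKey u)) b) sl []) := by
  induction sl generalizing b acc with
  | nil => simp [pvF]
  | cons l t ih =>
    simp only [List.foldl_cons, pvStep_some]
    rcases lt_trichotomy (pvKey l) b with hlt | heq | hgt
    · rw [if_pos hlt, ih]
      have hmin : min b (pvKey l) = pvKey l := min_eq_right hlt.le
      rw [hmin]
      have hmk := foldl_min_le_init (pvKey l) t
      have hmb : ¬ t.foldl (fun x u => min x (pvKey u)) (pvKey l) = b := by omega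
      rw [if_neg hmb]
      by_cases h1 : t.foldl (fun x u => min x (pvKey u)) (pvKey l) = pvKey l
      · rw [h1, if_pos rfl, pvF_cons, if_pos rfl, pvF_acc _ t (([] : List Int) ++ pvProds l)]
        simp
      · rw [if_neg h1, pvF_cons, if_neg (fun h => h1 h.symm)]
    · rw [if_neg (by omega), if_pos heq, ih]
      have hmin : min b (pvKey l) = b := min_eq_left heq.ge
      rw [hmin]
      have hmk := foldl_min_le_init b t
      by_cases h1 : t.foldl (fun x u => min x (pvKey u)) b = b
      · rw [if_pos h1, if_pos h1, pvF_cons, if_pos heq, pvF_acc _ t (([] : List Int) ++ pvProds l)]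
        simp
      · rw [if_neg h1, if_neg h1, pvF_cons, if_neg (by omega : ¬ pvKey l = t.foldl (fun x u => min x (pvKey u)) b)]
    · rw [if_neg (by omega), if_neg (by omega), ih]
      have hmin : min b (pvKey l) = b := min_eq_left hgt.le
      rw [hmin]
      have hmk := foldl_min_le_init b t
      by_cases h1 : t.foldl (fun x u => min x (pvKey u)) b = b
      · rw [if_pos h1, if_pos h1, pvF_cons, if_neg (by omega : ¬ pvKey l = b)]
      · rw [if_neg h1, if_neg h1, pvF_cons, if_neg (by omega : ¬ pvKey l = t.foldl (fun x u => min x (pvKey u)) b)]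

theorem main_eq (l : List (List Int)) (t : List (List (List Int))) :
    determine_quantum_entanglements (l :: t) = determine_quantum_entanglements_alt (l :: t) := by
  have hA : determine_quantum_entanglements (l :: t)
      = pvF (t.foldl (fun x u => min x (pvKey u)) (pvKey l)) (l :: t) [] := by
    simp only [determine_quantum_entanglements, calculate_quantum_entanglement, pvF, pvKey, pvProds]
    rw [List.map_cons, PySem.List.min?_id_cons, List.foldl_map]
    simp only [Option.getD_some]
    congr 1
    funext qe loading
    split_ifs with h
    · have := inner_foldl_eq loading qe
      simp only [pvProds] at this
      exact this
    · rfl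
  have hB : determine_quantum_entanglements_alt (l :: t)
      = ((l :: t).foldl pvStep (none, [])).2 := rfl
  rw [hA, hB]
  simp only [List.foldl_cons, pvStep_none, pvStep_invariant]
  have hmk := foldl_min_le_init (pvKey l) t
  by_cases h1 : t.foldl (fun x u => min x (pvKey u)) (pvKey l) = pvKey l
  · rw [h1, if_pos rfl, pvF_cons, if_pos rfl, pvF_acc _ t (([] : List Int) ++ pvProds l)]
    simp
  · rw [if_neg h1, pvF_cons, if_neg (fun h => h1 h.symm)]

-- ===== VERDICT (by name: the statement is the Claim_ definition above) =====
theorem determine_quantum_entanglements_spec : Claim_equal_determine_quantum_entanglements := by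
  intro sl _ hpre
  unfold Spec_determine_quantum_entanglements
  cases sl with
  | nil => exact absurd rfl hpre.1
  | cons l t => exact main_eq l t
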